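-- pv_equiv track=rewrite | github.com/bonin1/AI-Customer-Support-Ticket-Classifier | src/model_versioning.py | _generate_version_number
-- ===== SOURCE A (Python) =====
-- from typing import Dict, List, Tuple, Any, Optional, Union
--
-- def _generate_version_number(existing_versions: List[str]) -> str:
--     """Generate next version number."""
--     if not existing_versions:
--         return "1.0.0"
--
--     # Parse versions and find the highest
--     max_version = [0, 0, 0]
--     for version in existing_versions:
--         try:
--             parts = [int(x) for x in version.split('.')]
--             if len(parts) == 3:
--                 if parts > max_version:
--                     max_version = parts
--         except ValueError:
--             continue
--
--     # Increment patch version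
--     max_version[2] += 1
--     return '.'.join(map(str, max_version))
-- ===== SOURCE B (Python) =====
-- def _generate_version_number(existing_versions):
--     """Generate next version number."""
--     if not existing_versions:
--         return "1.0.0"
--
--     # Collect every valid parsed version triple, seeded with the baseline.
--     valid = [(0, 0, 0)]
--     for version in existing_versions:
--         try:
--             a, b, c = version.split('.')
--             valid.append((int(a), int(b), int(c)))
--         except ValueError:
--             pass
--
--     # Highest version = last element after sorting.
--     major, minor, patch = sorted(valid)[-1]
--     return '.'.join((str(major), str(minor), str(patch + 1)))
-- ===== Notes on version B (the rewrite author's own statement) =====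
-- stated objective: alternative
-- what changed: B replaces A's single-pass running-maximum fold (comprehension-parse then len==3 check) by collecting all valid parsed triples via tuple-unpacking of the split (seeded with the (0,0,0) baseline), sorting the list and taking the last element as the maximum.
import Mathlib
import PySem

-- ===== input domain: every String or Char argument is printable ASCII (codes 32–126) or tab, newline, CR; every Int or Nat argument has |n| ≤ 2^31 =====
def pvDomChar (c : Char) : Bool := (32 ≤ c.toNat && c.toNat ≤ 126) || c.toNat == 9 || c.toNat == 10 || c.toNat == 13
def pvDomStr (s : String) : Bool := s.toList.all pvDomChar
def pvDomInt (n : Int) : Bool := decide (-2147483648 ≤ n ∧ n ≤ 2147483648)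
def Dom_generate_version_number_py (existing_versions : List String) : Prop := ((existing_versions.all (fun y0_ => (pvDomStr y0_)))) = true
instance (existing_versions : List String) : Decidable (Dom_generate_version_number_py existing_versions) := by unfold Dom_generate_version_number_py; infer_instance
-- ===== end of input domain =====

-- B finds the highest valid version by sorting the collected triples instead of A's
-- running-maximum loop; objective: alternative (same observable behaviour, not faster).

-- Python tuple/list lexicographic strict '<' on a version triple (exact: 3 int components)
def pvLt (x y : Int × Int × Int) : Bool :=
  decide (x.1 < y.1 ∨ (x.1 = y.1 ∧ (x.2.1 < y.2.1 ∨ (x.2.1 = y.2.1 ∧ x.2.2 < y.2.2))))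

-- ===== PORT A =====
-- '[int(x) for x in parts]' with ValueError propagated = none
def pvParseAll : List String → Option (List Int)
  | [] => some []
  | x :: xs =>
    match PySem.Int.ofStr? x, pvParseAll xs with
    | some i, some rest => some (i :: rest)
    | _, _ => none

-- one iteration of A's loop body (try/except: any ValueError skips the version)
def pvStepA (m : Int × Int × Int) (version : String) : Int × Int × Int :=
  match pvParseAll ((PySem.Str.split? version ".").getD []) with
  | none => m            -- ValueError: continue
  | some parts =>
    match parts with
    | [a, b, c] => if pvLt m (a, b, c) then (a, b, c) else m   -- len(parts)==3 and parts > max_version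
    | _ => m

def generate_version_number_py (existing_versions : List String) : String :=
  if existing_versions = [] then "1.0.0"
  else
    let m := existing_versions.foldl pvStepA ((0 : Int), (0 : Int), (0 : Int))
    PySem.Str.join "." ([m.1, m.2.1, m.2.2 + 1].map PySem.Int.toStr)

-- ===== PORT B =====
-- 'a, b, c = version.split('.'); (int(a), int(b), int(c))' with ValueError caught = none
def pvParse3 (version : String) : Option (Int × Int × Int) :=
  match (PySem.Str.split? version ".").getD [] with
  | [a, b, c] =>
    match PySem.Int.ofStr? a, PySem.Int.ofStr? b, PySem.Int.ofStr? c with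
    | some i, some j, some k => some (i, j, k)
    | _, _, _ => none
  | _ => none            -- wrong number of parts: unpacking raises ValueError

def generate_version_number_py_alt (existing_versions : List String) : String :=
  if existing_versions = [] then "1.0.0"
  else
    let valid := existing_versions.foldl
      (fun acc version => match pvParse3 version with
        | some t => acc ++ [t]
        | none => acc)
      [((0 : Int), (0 : Int), (0 : Int))]
    -- sorted(valid): Python's stable sort = repeated ordered insertion (PySem.List.sorted's rfl form)
    let s := valid.foldl (fun acc x => PySem.List.insertBy pvLt x acc) []
    match PySem.List.pyGet? s (-1) with      -- sorted(valid)[-1]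
    | some (major, minor, patch) =>
        PySem.Str.join "." [PySem.Int.toStr major, PySem.Int.toStr minor, PySem.Int.toStr (patch + 1)]
    | none => "1.0.0"    -- unreachable: valid always contains the (0,0,0) seed

-- ===== PRECONDITION & SPEC =====
def Spec_generate_version_number_py (existing_versions : List String) (out : String) : Prop := out = generate_version_number_py_alt existing_versions
instance (existing_versions : List String) (out : String) : Decidable (Spec_generate_version_number_py existing_versions out) := by unfold Spec_generate_version_number_py; infer_instance

-- ===== CLAIM (what is proved, stated in full; the proofs are below) =====
def Claim_equal_generate_version_number_py : Prop := ∀ (existing_versions : List String), Dom_generate_version_number_py existing_versions → Spec_generate_version_number_py existing_versions (generate_version_number_py existing_versions)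

-- ===== LEMMAS AND PROOFS =====

theorem pvLt_asymm {x y : Int × Int × Int} (h : pvLt x y = true) : pvLt y x = false := by
  obtain ⟨a, b, c⟩ := x; obtain ⟨d, e, f⟩ := y
  simp only [pvLt, decide_eq_true_eq, decide_eq_false_iff_not] at *
  omega

theorem pvLt_trans {x y z : Int × Int × Int} (h1 : pvLt x y = true) (h2 : pvLt y z = true) :
    pvLt x z = true := by
  obtain ⟨a, b, c⟩ := x; obtain ⟨d, e, f⟩ := y; obtain ⟨g, i, j⟩ := z
  simp only [pvLt, decide_eq_true_eq] at *
  omega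

theorem pvLt_total {x y : Int × Int × Int} (h1 : pvLt x y = false) (h2 : pvLt y x = false) :
    x = y := by
  obtain ⟨a, b, c⟩ := x; obtain ⟨d, e, f⟩ := y
  simp only [pvLt, decide_eq_false_iff_not, Prod.mk.injEq] at *
  omega

theorem pvParseAll_length (l : List String) (ps : List Int)
    (h : pvParseAll l = some ps) : ps.length = l.length := by
  induction l generalizing ps with
  | nil => simp [pvParseAll] at h; simp [h.symm]
  | cons x xs ih =>
    unfold pvParseAll at h
    cases hx : PySem.Int.ofStr? x <;> cases hxs : pvParseAll xs <;> simp [hx, hxs] at h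
    simp [h.symm, ih _ hxs]

theorem pvStepA_eq (m : Int × Int × Int) (v : String) :
    pvStepA m v = match pvParse3 v with
      | some t => if pvLt m t then t else m
      | none => m := by
  unfold pvStepA pvParse3
  rcases h : (PySem.Str.split? v ".").getD [] with _ | ⟨a, _ | ⟨b, _ | ⟨c, _ | ⟨d, t⟩⟩⟩⟩
  · simp [pvParseAll]
  · cases ha : PySem.Int.ofStr? a <;> simp [pvParseAll, ha]
  · cases ha : PySem.Int.ofStr? a <;> cases hb : PySem.Int.ofStr? b <;>
      simp [pvParseAll, ha, hb]
  · cases ha : PySem.Int.ofStr? a <;> cases hb : PySem.Int.ofStr? b <;>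
      cases hc : PySem.Int.ofStr? c <;> simp [pvParseAll, ha, hb, hc]
  · cases hp : pvParseAll (a :: b :: c :: d :: t) with
    | none => simp
    | some ps =>
      have hlen : ps.length = (a :: b :: c :: d :: t).length := pvParseAll_length _ _ hp
      rcases ps with _ | ⟨p, _ | ⟨q, _ | ⟨r, _ | ⟨u, w⟩⟩⟩⟩ <;> simp_all

theorem foldl_step_filterMap (vs : List String) (m0 : Int × Int × Int) :
    vs.foldl pvStepA m0 =
      (vs.filterMap pvParse3).foldl (fun m t => if pvLt m t then t else m) m0 := by
  induction vs generalizing m0 with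
  | nil => rfl
  | cons v vs ih =>
    simp only [List.foldl_cons, List.filterMap_cons, ih, pvStepA_eq]
    cases pvParse3 v <;> simp

theorem foldl_append_filterMap (vs : List String) (acc0 : List (Int × Int × Int)) :
    vs.foldl (fun acc version => match pvParse3 version with
        | some t => acc ++ [t]
        | none => acc) acc0 = acc0 ++ vs.filterMap pvParse3 := by
  induction vs generalizing acc0 with
  | nil => simp
  | cons v vs ih =>
    simp only [List.foldl_cons, List.filterMap_cons]
    cases pvParse3 v <;> simp [ih]

theorem getLast?_cons_ne {α : Type} (y : α) {ys : List α} (h : ys ≠ []) :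
    (y :: ys).getLast? = ys.getLast? := by
  cases ys with
  | nil => exact absurd rfl h
  | cons z zs => exact List.getLast?_cons_cons

-- nondecreasing in the pvLt order
def pvSorted (s : List (Int × Int × Int)) : Prop := s.Pairwise (fun a b => pvLt b a = false)

theorem sorted_insertBy {s : List (Int × Int × Int)} (hs : pvSorted s) (x : Int × Int × Int) :
    pvSorted (PySem.List.insertBy pvLt x s) := by
  induction s with
  | nil => simp [PySem.List.insertBy, pvSorted]
  | cons y ys ih =>
    obtain ⟨hy, hys⟩ := List.pairwise_cons.1 hs
    by_cases hxy : pvLt x y = true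
    · simp only [PySem.List.insertBy, hxy]
      refine List.Pairwise.cons ?_ (List.Pairwise.cons hy hys)
      intro z hz
      rcases List.mem_cons.1 hz with rfl | hz
      · exact pvLt_asymm hxy
      · by_cases hzx : pvLt z x = true
        · exact absurd (pvLt_trans hzx hxy) (by simp [hy _ hz])
        · simpa using hzx
    · simp only [PySem.List.insertBy, hxy]
      refine List.Pairwise.cons ?_ (ih hys)
      intro z hz
      rcases (PySem.List.mem_insertBy _ _ _ _).1 hz with rfl | hz
      · simpa using hxy
      · exact hy _ hz

theorem insertBy_ne_nil (x : Int × Int × Int) (s : List (Int × Int × Int)) :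
    PySem.List.insertBy pvLt x s ≠ [] := by
  cases s with
  | nil => simp [PySem.List.insertBy]
  | cons y ys =>
    by_cases h : pvLt x y = true <;> simp [PySem.List.insertBy, h]

theorem getLast?_insertBy {s : List (Int × Int × Int)} (hs : pvSorted s) (x : Int × Int × Int) :
    (PySem.List.insertBy pvLt x s).getLast? =
      some (match s.getLast? with
        | none => x
        | some l => if pvLt l x then x else l) := by
  induction s with
  | nil => simp [PySem.List.insertBy]
  | cons y ys ih =>
    obtain ⟨hy, hys⟩ := List.pairwise_cons.1 hs
    by_cases hxy : pvLt x y = true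
    · simp only [PySem.List.insertBy, hxy, if_true]
      cases hl : (y :: ys).getLast? with
      | none => simp at hl
      | some l =>
        have hly : l ∈ y :: ys := List.mem_of_getLast? hl
        have hlx : pvLt l x = false := by
          by_contra hc
          have hlx' : pvLt l x = true := by simpa using hc
          rcases List.mem_cons.1 hly with rfl | hly
          · exact absurd (pvLt_asymm hxy) (by simp [hlx'])
          · exact absurd (pvLt_trans hlx' hxy) (by simp [hy _ hly])
        rw [List.getLast?_cons_cons, hl]
        simp [hlx]
    · simp only [PySem.List.insertBy, hxy, Bool.false_eq_true, if_false]
      rw [getLast?_cons_ne _ (insertBy_ne_nil x ys), ih hys]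
      cases ys with
      | nil =>
        simp only [List.getLast?_nil, List.getLast?_singleton]
        by_cases hyx : pvLt y x = true
        · simp [hyx]
        · have : x = y := pvLt_total (by simpa using hxy) (by simpa using hyx)
          simp [this]
      | cons z zs => rw [List.getLast?_cons_cons]

theorem foldl_insert_getLast (ys : List (Int × Int × Int)) :
    ∀ (acc : List (Int × Int × Int)), pvSorted acc →
    pvSorted (ys.foldl (fun acc x => PySem.List.insertBy pvLt x acc) acc) ∧
    (ys.foldl (fun acc x => PySem.List.insertBy pvLt x acc) acc).getLast? =
      (match acc.getLast? with
        | none => match ys with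
          | [] => none
          | y :: t => some (t.foldl (fun m p => if pvLt m p then p else m) y)
        | some l => some (ys.foldl (fun m p => if pvLt m p then p else m) l)) := by
  induction ys with
  | nil =>
    intro acc hacc
    refine ⟨hacc, ?_⟩
    cases hl : acc.getLast? <;> simp [hl]
  | cons y t ih =>
    intro acc hacc
    obtain ⟨h1, h2⟩ := ih (PySem.List.insertBy pvLt y acc) (sorted_insertBy hacc y)
    refine ⟨h1, ?_⟩
    simp only [List.foldl_cons]
    rw [h2, getLast?_insertBy hacc y]
    cases hl : acc.getLast? with
    | none => cases t <;> simp
    | some l => simp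

theorem pyGet_neg_one (s : List (Int × Int × Int)) :
    PySem.List.pyGet? s (-1) = s.getLast? := by
  cases s with
  | nil => simp [PySem.List.pyGet?, PySem.List.pyIdx?]
  | cons y ys =>
    have h1 : PySem.List.pyIdx? (y :: ys).length (-1) = some ys.length := by
      simp only [PySem.List.pyIdx?, List.length_cons]
      norm_num
    simp only [PySem.List.pyGet?, h1, Option.bind_some]
    rw [List.getLast?_eq_getElem?]
    simp

-- ===== VERDICT (by name: the statement is the Claim_ definition above) =====
theorem generate_version_number_py_spec : Claim_equal_generate_version_number_py := by
  intro vs _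
  unfold Spec_generate_version_number_py generate_version_number_py generate_version_number_py_alt
  by_cases h : vs = []
  · simp [h]
  · simp only [h, if_false]
    obtain ⟨-, hlast⟩ := foldl_insert_getLast
      ((((0 : Int), (0 : Int), (0 : Int))) :: vs.filterMap pvParse3) []
      (by simp [pvSorted])
    rw [foldl_step_filterMap, foldl_append_filterMap, pyGet_neg_one]
    simp only [List.singleton_append] at *
    rw [hlast]
    simp only [List.getLast?_nil]
    rcases hm : (vs.filterMap pvParse3).foldl
        (fun m p => if pvLt m p then p else m) (((0 : Int), (0 : Int), (0 : Int))) with ⟨a, b, c⟩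
    simp
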